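-- pv_equiv track=rewrite | github.com/eggyrooch-blip/patch_clash_subscription | patch_resi_chain_sanitized.py | _ensure_toplevel_port
-- ===== SOURCE A (Python) =====
-- from typing import Tuple, Optional, List
--
-- def _split_lines_keepends(s: str) -> List[str]:
--     return s.splitlines(keepends=True)
--
-- def _ensure_toplevel_port(text: str, desired_port: int) -> Tuple[str, bool]:
--     lines = _split_lines_keepends(text)
--     stop_idx = len(lines)
--     for k, ln in enumerate(lines):
--         if ln.startswith("dns:") or ln.startswith("proxies:"):
--             stop_idx = k
--             break
--
--     changed = False
--     port_line_idx: Optional[int] = None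
--     for k in range(stop_idx):
--         if lines[k].startswith("port: "):
--             port_line_idx = k
--             break
--
--     if port_line_idx is None:
--         insert_after = None
--         for k in range(stop_idx):
--             if lines[k].startswith("mixed-port: "):
--                 insert_after = k
--                 break
--         if insert_after is not None:
--             lines.insert(insert_after + 1, f"port: {desired_port}\n")
--             changed = True
--         else:
--             lines.insert(stop_idx, f"port: {desired_port}\n")
--             changed = True
--     else:
--         desired = f"port: {desired_port}"
--         if lines[port_line_idx].strip() != desired:
--             lines[port_line_idx] = desired + "\n"
--             changed = True
--
--     return "".join(lines), changed
-- ===== SOURCE B (Python) =====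
-- def _ensure_toplevel_port(text, desired_port):
--     # Streaming decision machine: emit lines until the first line that decides the
--     # outcome (boundary -> insert here; port line -> replace/keep; mixed-port line
--     # with no port line ahead of it before the boundary -> insert right after it),
--     # then splice the tail verbatim.  No index bookkeeping at all.
--     desired = f"port: {desired_port}"
--     lines = text.splitlines(keepends=True)
--     out = []
--     port_ahead = False
--     for i, ln in enumerate(lines):
--         if ln.startswith("dns:") or ln.startswith("proxies:"):
--             return "".join(out) + desired + "\n" + "".join(lines[i:]), True
--         if ln.startswith("port: "):
--             if ln.strip() == desired:
--                 return text, False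
--             return "".join(out) + desired + "\n" + "".join(lines[i + 1:]), True
--         out.append(ln)
--         if ln.startswith("mixed-port: ") and not port_ahead:
--             port_ahead = _port_line_ahead(lines, i + 1)
--             if not port_ahead:
--                 return "".join(out) + desired + "\n" + "".join(lines[i + 1:]), True
--     return "".join(out) + desired + "\n", True
--
--
-- def _port_line_ahead(lines, j):
--     for ln in lines[j:]:
--         if ln.startswith("dns:") or ln.startswith("proxies:"):
--             return False
--         if ln.startswith("port: "):
--             return True
--     return False
-- ===== Notes on version B (the rewrite author's own statement) =====
-- stated objective: alternative
-- what changed: B replaces A's staged index computations (find stop boundary, find port index, find mixed-port index, then list.insert/assign by index) with a streaming emit-as-you-go pass that copies lines until one line decides the outcome, using a lookahead predicate 'is there a port line ahead before the boundary' instead of any index bookkeeping.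
import Mathlib
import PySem

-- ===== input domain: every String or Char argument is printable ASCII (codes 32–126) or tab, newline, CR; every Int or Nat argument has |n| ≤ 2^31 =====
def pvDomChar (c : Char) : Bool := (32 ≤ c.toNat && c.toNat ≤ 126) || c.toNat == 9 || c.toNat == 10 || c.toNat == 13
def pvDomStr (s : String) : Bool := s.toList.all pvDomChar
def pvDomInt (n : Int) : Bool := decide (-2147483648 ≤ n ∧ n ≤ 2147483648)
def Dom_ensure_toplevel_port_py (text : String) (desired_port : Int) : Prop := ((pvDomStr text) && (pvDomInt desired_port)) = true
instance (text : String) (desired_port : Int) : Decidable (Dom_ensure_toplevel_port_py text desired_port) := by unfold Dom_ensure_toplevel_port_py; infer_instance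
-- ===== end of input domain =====

-- B replaces A's three staged index scans + insert/set by a streaming emit-as-you-go pass with a
-- lookahead predicate and no index bookkeeping; objective: alternative (same O(n) cost).

-- hand port of str.splitlines(keepends=True): exact on the domain's line boundaries '\n', '\r', '\r\n'
-- (shared by both ports, like a PySem primitive)
def pvSplitKeep : List Char → List Char → List (List Char)
  | cur, [] => if cur = [] then [] else [cur.reverse]
  | cur, '\r' :: '\n' :: rest => (cur.reverse ++ ['\r', '\n']) :: pvSplitKeep [] rest
  | cur, '\n' :: rest => (cur.reverse ++ ['\n']) :: pvSplitKeep [] rest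
  | cur, '\r' :: rest => (cur.reverse ++ ['\r']) :: pvSplitKeep [] rest
  | cur, c :: rest => pvSplitKeep (c :: cur) rest

-- ===== PORT A =====
-- first enumerate-loop of A: break at the first "dns:"/"proxies:" line, default len(lines)
def findStopA : List (List Char) → Nat → Nat
  | [], k => k
  | l :: rest, k =>
    if PySem.Chars.startswith l ("dns:".toList) || PySem.Chars.startswith l ("proxies:".toList)
    then k else findStopA rest (k + 1)

-- A's 'for k in range(stop_idx): if lines[k].startswith(p): break' — first index with the prefix, over lines.take stop
def findPrefA (p : List Char) : List (List Char) → Nat → Option Nat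
  | [], _ => none
  | l :: rest, k => if PySem.Chars.startswith l p then some k else findPrefA p rest (k + 1)

def ensure_toplevel_port_py (text : String) (desired_port : Int) : String × Bool :=
  let lines := pvSplitKeep [] text.toList
  let stop := findStopA lines 0
  let desired := "port: ".toList ++ PySem.Int.toChars desired_port
  match findPrefA ("port: ".toList) (lines.take stop) 0 with
  | none =>
    match findPrefA ("mixed-port: ".toList) (lines.take stop) 0 with
    | some ia => (String.ofList ((PySem.List.insert lines ((ia : Int) + 1) (desired ++ ['\n'])).flatten), true)
    | none => (String.ofList ((PySem.List.insert lines ((stop : Nat) : Int) (desired ++ ['\n'])).flatten), true)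
  | some k =>
    if PySem.Chars.strip (lines.getD k []) ≠ desired then
      (String.ofList ((lines.set k (desired ++ ['\n'])).flatten), true)
    else (String.ofList lines.flatten, false)

-- ===== PORT B =====
-- B's lookahead: is there a "port: " line before the first "dns:"/"proxies:" line?
def portAheadB : List (List Char) → Bool
  | [] => false
  | l :: rest =>
    if PySem.Chars.startswith l ("dns:".toList) || PySem.Chars.startswith l ("proxies:".toList) then false
    else if PySem.Chars.startswith l ("port: ".toList) then true
    else portAheadB rest

-- B's streaming loop: emit lines into `out` until a line decides the outcome, then splice the tail
def goB (desired : List Char) (orig : String) : List (List Char) → List Char → Bool → String × Bool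
  | [], out, _ => (String.ofList (out ++ desired ++ ['\n']), true)
  | ln :: rest, out, portAhead =>
    if PySem.Chars.startswith ln ("dns:".toList) || PySem.Chars.startswith ln ("proxies:".toList) then
      (String.ofList (out ++ desired ++ ['\n'] ++ (ln :: rest).flatten), true)
    else if PySem.Chars.startswith ln ("port: ".toList) then
      if PySem.Chars.strip ln = desired then (orig, false)
      else (String.ofList (out ++ desired ++ ['\n'] ++ rest.flatten), true)
    else if PySem.Chars.startswith ln ("mixed-port: ".toList) && !portAhead then
      (if portAheadB rest then goB desired orig rest (out ++ ln) true
       else (String.ofList (out ++ ln ++ desired ++ ['\n'] ++ rest.flatten), true))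
    else goB desired orig rest (out ++ ln) portAhead

def ensure_toplevel_port_py_alt (text : String) (desired_port : Int) : String × Bool :=
  let desired := "port: ".toList ++ PySem.Int.toChars desired_port
  let lines := pvSplitKeep [] text.toList
  goB desired text lines [] false

-- ===== PRECONDITION & SPEC =====
def Spec_ensure_toplevel_port_py (text : String) (desired_port : Int) (out : String × Bool) : Prop := out = ensure_toplevel_port_py_alt text desired_port
instance (text : String) (desired_port : Int) (out : String × Bool) : Decidable (Spec_ensure_toplevel_port_py text desired_port out) := by unfold Spec_ensure_toplevel_port_py; infer_instance

-- ===== CLAIM (what is proved, stated in full; the proofs are below) =====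
def Claim_equal_ensure_toplevel_port_py : Prop := ∀ (text : String) (desired_port : Int), Dom_ensure_toplevel_port_py text desired_port → Spec_ensure_toplevel_port_py text desired_port (ensure_toplevel_port_py text desired_port)

-- ===== LEMMAS AND PROOFS =====

lemma flatten_pvSplitKeep : ∀ (cur s : List Char), (pvSplitKeep cur s).flatten = cur.reverse ++ s := by
  intro cur s
  induction cur, s using pvSplitKeep.induct <;> simp [pvSplitKeep, *]

lemma findStopA_shift (lines : List (List Char)) : ∀ k, findStopA lines k = k + findStopA lines 0 := by
  induction lines with
  | nil => intro k; simp [findStopA]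
  | cons l rest ih =>
    intro k
    simp only [findStopA]
    split
    · simp
    · rw [ih (k+1), ih 1]; omega

lemma findStopA_le (lines : List (List Char)) : findStopA lines 0 ≤ lines.length := by
  induction lines with
  | nil => simp [findStopA]
  | cons l rest ih =>
    simp only [findStopA]
    split
    · simp
    · rw [findStopA_shift rest 1]; simp only [List.length_cons]; omega

lemma findPrefA_lt (p : List Char) (t : List (List Char)) : ∀ k j, findPrefA p t k = some j → j < k + t.length := by
  induction t with
  | nil => intro k j h; simp [findPrefA] at h
  | cons l rest ih =>
    intro k j h
    simp only [findPrefA] at h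
    split at h
    · simp only [Option.some.injEq] at h
      simp only [List.length_cons]; omega
    · have := ih (k+1) j h
      simp only [List.length_cons]; omega

lemma findPrefA_shift (p : List Char) (t : List (List Char)) :
    ∀ k, findPrefA p t k = (findPrefA p t 0).map (· + k) := by
  induction t with
  | nil => intro k; simp [findPrefA]
  | cons l rest ih =>
    intro k
    simp only [findPrefA]
    split
    · simp
    · rw [ih (k+1), ih 1, Option.map_map]
      cases findPrefA p rest 0 <;> simp <;> omega

lemma portAheadB_eq (lines : List (List Char)) :
    portAheadB lines = (findPrefA ("port: ".toList) (lines.take (findStopA lines 0)) 0).isSome := by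
  induction lines with
  | nil => simp [portAheadB, findStopA, findPrefA]
  | cons l rest ih =>
    simp only [portAheadB, findStopA]
    split
    · simp [findPrefA]
    · rw [findStopA_shift rest 1, Nat.add_comm 1 (findStopA rest 0), List.take_succ_cons]
      simp only [findPrefA]
      split
      · simp
      · rw [ih, findPrefA_shift _ _ 1]
        cases findPrefA ("port: ".toList) (rest.take (findStopA rest 0)) 0 <;> simp

-- the streaming loop computed in terms of A's three staged finds
lemma goB_spec (desired : List Char) (orig : String) :
    ∀ (lines : List (List Char)) (out : List Char) (seen : Bool),
    (seen = true → portAheadB lines = true) →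
    goB desired orig lines out seen =
      (match findPrefA ("port: ".toList) (lines.take (findStopA lines 0)) 0 with
       | some k =>
         if PySem.Chars.strip (lines.getD k []) = desired then (orig, false)
         else (String.ofList (out ++ (lines.take k).flatten ++ desired ++ '\n' :: (lines.drop (k+1)).flatten), true)
       | none =>
         match (if seen then none else findPrefA ("mixed-port: ".toList) (lines.take (findStopA lines 0)) 0) with
         | some ia => (String.ofList (out ++ (lines.take (ia+1)).flatten ++ desired ++ '\n' :: (lines.drop (ia+1)).flatten), true)
         | none => (String.ofList (out ++ (lines.take (findStopA lines 0)).flatten ++ desired ++ '\n' :: (lines.drop (findStopA lines 0)).flatten), true)) := by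
  intro lines
  induction lines with
  | nil =>
    intro out seen _
    cases seen <;> simp [goB, findStopA, findPrefA]
  | cons ln rest ih =>
    intro out seen hseen
    by_cases hbd : (PySem.Chars.startswith ln ("dns:".toList) || PySem.Chars.startswith ln ("proxies:".toList)) = true
    · simp only [goB, findStopA, hbd, if_pos]
      cases seen <;> simp [findPrefA]
    · have hbd0 : (PySem.Chars.startswith ln ("dns:".toList) || PySem.Chars.startswith ln ("proxies:".toList)) = false := by
        simpa using hbd
      simp only [goB, findStopA, hbd0, Bool.false_eq_true, if_false]
      rw [findStopA_shift rest 1, Nat.add_comm 1 (findStopA rest 0), List.take_succ_cons]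
      by_cases hport : PySem.Chars.startswith ln ("port: ".toList) = true
      · simp only [findPrefA, hport, if_pos]
        by_cases hstr : PySem.Chars.strip ln = desired <;> simp [hstr]
      · have hport0 : PySem.Chars.startswith ln ("port: ".toList) = false := by simpa using hport
        simp only [findPrefA, hport0, Bool.false_eq_true, if_false]
        rw [findPrefA_shift ("port: ".toList) _ 1]
        by_cases hm : (PySem.Chars.startswith ln ("mixed-port: ".toList) && !seen) = true
        · rw [if_pos hm]
          have hseenf : seen = false := by
            rcases Bool.and_eq_true .. |>.mp hm with ⟨_, h2⟩
            cases seen <;> simp_all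
          subst hseenf
          by_cases hpa : portAheadB rest = true
          · rw [if_pos hpa, ih (out ++ ln) true (fun _ => hpa)]
            rw [portAheadB_eq] at hpa
            cases hfp : findPrefA ("port: ".toList) (rest.take (findStopA rest 0)) 0 with
            | none => rw [hfp] at hpa; simp at hpa
            | some k =>
              simp only [Option.map_some]
              by_cases hstr : PySem.Chars.strip (rest.getD k []) = desired <;>
                simp [hstr, List.take_succ_cons, List.drop_succ_cons]
          · rw [if_neg hpa]
            have hpa0 : portAheadB rest = false := by simpa using hpa
            rw [portAheadB_eq] at hpa0
            cases hfp : findPrefA ("port: ".toList) (rest.take (findStopA rest 0)) 0 with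
            | some k => rw [hfp] at hpa0; simp at hpa0
            | none =>
              have hmix : PySem.Chars.startswith ln ("mixed-port: ".toList) = true :=
                (Bool.and_eq_true .. |>.mp hm).1
              simp only [Option.map_none, Bool.false_eq_true, if_false]
              rw [if_pos hmix]
              simp [List.take_succ_cons, List.drop_succ_cons]
        · rw [if_neg hm]
          have hseen' : seen = true → portAheadB rest = true := by
            intro h
            have h2 := hseen h
            simp only [portAheadB] at h2
            rw [hbd0, hport0] at h2
            simpa using h2
          rw [ih (out ++ ln) seen hseen']
          cases hfp : findPrefA ("port: ".toList) (rest.take (findStopA rest 0)) 0 with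
          | some k =>
            simp only [Option.map_some]
            by_cases hstr : PySem.Chars.strip (rest.getD k []) = desired <;>
              simp [hstr, List.take_succ_cons, List.drop_succ_cons]
          | none =>
            simp only [Option.map_none]
            cases seen with
            | true => simp [List.take_succ_cons, List.drop_succ_cons]
            | false =>
              have hmix : PySem.Chars.startswith ln ("mixed-port: ".toList) = false := by
                cases h : PySem.Chars.startswith ln ("mixed-port: ".toList) <;> simp_all
              simp only [Bool.false_eq_true, if_false]
              rw [hmix]
              simp only [Bool.false_eq_true, if_false]
              rw [findPrefA_shift ("mixed-port: ".toList) _ 1]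
              cases findPrefA ("mixed-port: ".toList) (rest.take (findStopA rest 0)) 0 <;>
                simp [List.take_succ_cons, List.drop_succ_cons]

-- A's staged computation, with `lines` generalized, equals B's streaming loop
lemma main_eq (desired : List Char) (orig : String) (lines : List (List Char))
    (hflat : lines.flatten = orig.toList) :
    (match findPrefA ("port: ".toList) (lines.take (findStopA lines 0)) 0 with
     | none =>
       match findPrefA ("mixed-port: ".toList) (lines.take (findStopA lines 0)) 0 with
       | some ia => (String.ofList ((PySem.List.insert lines ((ia : Int) + 1) (desired ++ ['\n'])).flatten), true)
       | none => (String.ofList ((PySem.List.insert lines ((findStopA lines 0 : Nat) : Int) (desired ++ ['\n'])).flatten), true)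
     | some k =>
       if PySem.Chars.strip (lines.getD k []) ≠ desired then
         (String.ofList ((lines.set k (desired ++ ['\n'])).flatten), true)
       else (String.ofList lines.flatten, false))
    = goB desired orig lines [] false := by
  rw [goB_spec desired orig lines [] false (by simp)]
  have hstople := findStopA_le lines
  cases hp : findPrefA ("port: ".toList) (lines.take (findStopA lines 0)) 0 with
  | some k =>
    have hk : k < lines.length := by
      have := findPrefA_lt _ _ 0 k hp
      simp only [List.length_take] at this; omega
    simp only [ne_eq, ite_not, List.getD_eq_getElem?_getD]
    by_cases hstr : PySem.Chars.strip ((lines[k]?).getD []) = desired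
    · simp [hstr, hflat, String.ofList_toList]
    · rw [List.set_eq_take_cons_drop _ hk]
      simp [hstr]
  | none =>
    cases hm : findPrefA ("mixed-port: ".toList) (lines.take (findStopA lines 0)) 0 with
    | some ia =>
      have hia : ia < findStopA lines 0 := by
        have := findPrefA_lt _ _ 0 ia hm
        simp [List.length_take] at this; omega
      have hle : ia + 1 ≤ lines.length := by omega
      have hins : PySem.List.insert lines ((ia : Int) + 1) (desired ++ ['\n'])
          = lines.take (ia + 1) ++ (desired ++ ['\n']) :: lines.drop (ia + 1) := by
        have := PySem.List.insert_natCast lines (ia + 1) (desired ++ ['\n']) hle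
        simpa [Int.natCast_add] using this
      simp [hins]
    | none =>
      have hins := PySem.List.insert_natCast lines (findStopA lines 0) (desired ++ ['\n']) hstople
      simp [hins]

-- ===== VERDICT (by name: the statement is the Claim_ definition above) =====
theorem ensure_toplevel_port_py_spec : Claim_equal_ensure_toplevel_port_py := by
  intro text desired_port _
  unfold Spec_ensure_toplevel_port_py ensure_toplevel_port_py ensure_toplevel_port_py_alt
  exact main_eq ("port: ".toList ++ PySem.Int.toChars desired_port) text (pvSplitKeep [] text.toList)
    (by rw [flatten_pvSplitKeep]; simp)
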